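-- pv_equiv track=rewrite | github.com/peternordby/adventofcode | 2023/d14.py | move_rocks
-- ===== SOURCE A (Python) =====
-- def move_rocks(grid):
--     for i, row in enumerate(grid):
--         string = ''.join(row)
--         segments = string.split('#')
--         new_segments = []
--         for segment in segments:
--             o_count = segment.count('O')
--             ns = "".join(['O' * o_count, '.' * (len(segment) - o_count)])
--             new_segments.append(ns)
--         new_string = '#'.join(new_segments)
--         grid[i] = list(new_string)
--     return grid
-- ===== SOURCE B (Python) =====
-- def move_rocks(grid):
--     for i, row in enumerate(grid):
--         out = []
--         o = d = 0
--         for cell in row: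
--             for ch in cell:
--                 if ch == '#':
--                     out.extend(['O'] * o + ['.'] * d + ['#'])
--                     o = d = 0
--                 elif ch == 'O':
--                     o += 1
--                 else:
--                     d += 1
--         out.extend(['O'] * o + ['.'] * d)
--         grid[i] = out
--     return grid
-- ===== Notes on version B (the rewrite author's own statement) =====
-- stated objective: alternative
-- what changed: Replaces A's split-on-'#'/count/join string pipeline with a single left-to-right pass per row that keeps running counts of 'O' and non-'O' characters and flushes them at each '#' and at the end.
import Mathlib
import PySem

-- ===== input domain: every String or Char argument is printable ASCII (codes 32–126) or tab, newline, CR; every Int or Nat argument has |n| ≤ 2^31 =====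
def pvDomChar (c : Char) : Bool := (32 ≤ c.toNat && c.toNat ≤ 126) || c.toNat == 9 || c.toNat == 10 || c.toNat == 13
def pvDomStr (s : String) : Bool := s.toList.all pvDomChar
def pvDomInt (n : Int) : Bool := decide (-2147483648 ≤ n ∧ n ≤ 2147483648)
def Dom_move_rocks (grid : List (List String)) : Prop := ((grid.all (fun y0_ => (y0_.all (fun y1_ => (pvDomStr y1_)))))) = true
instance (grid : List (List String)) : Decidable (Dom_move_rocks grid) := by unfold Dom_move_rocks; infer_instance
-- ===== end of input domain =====

-- B replaces A's split-on-'#'/count/join string pipeline with a single pass per row keeping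
-- running 'O'/dot counters flushed at each '#' (alternative decomposition, same cost).
-- A mutates grid's rows in place (grid[i] = …); the equivalence proved here is about the return value.

-- ===== PORT A =====
-- String operations are ported on .toList via PySem.Chars (Str wrappers are thin; exact):
-- split('#') → Chars.splitOn, segment.count('O') → Chars.count, 'O'*n / '.'*n → List.replicate
-- (exact: count ≤ length, so the Nat subtraction equals Python's), list(s) → chars as 1-char strings.
def move_rocks (grid : List (List String)) : List (List String) :=
  grid.map (fun row =>
    let string := PySem.Str.join "" row                                 -- ''.join(row)
    let segments := PySem.Chars.splitOn string.toList ['#']             -- string.split('#')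
    let new_segments := segments.foldl (fun acc segment =>
      let o_count := PySem.Chars.count segment ['O']                    -- segment.count('O')
      let ns := List.replicate o_count 'O'
                  ++ List.replicate (segment.length - o_count) '.'      -- ''.join(['O'*o, '.'*(len-o)])
      acc ++ [ns]) []
    let new_string := PySem.Chars.join ['#'] new_segments               -- '#'.join(new_segments)
    new_string.map (fun c => String.mk [c]))                            -- grid[i] = list(new_string)

-- ===== PORT B =====
-- one step of B's inner character loop: state = (out, o, d)
def pvStep (st : List String × Nat × Nat) (ch : Char) : List String × Nat × Nat :=
  if ch = '#' then
    (st.1 ++ List.replicate st.2.1 "O" ++ List.replicate st.2.2 "." ++ ["#"], 0, 0)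
  else if ch = 'O' then (st.1, st.2.1 + 1, st.2.2)
  else (st.1, st.2.1, st.2.2 + 1)

def move_rocks_alt (grid : List (List String)) : List (List String) :=
  grid.map (fun row =>
    let st := row.foldl (fun st cell => cell.toList.foldl pvStep st)
                (([] : List String), (0 : Nat), (0 : Nat))
    st.1 ++ List.replicate st.2.1 "O" ++ List.replicate st.2.2 ".")    -- final flush

-- ===== PRECONDITION & SPEC =====
def Spec_move_rocks (grid : List (List String)) (out : List (List String)) : Prop := out = move_rocks_alt grid
instance (grid : List (List String)) (out : List (List String)) : Decidable (Spec_move_rocks grid out) := by unfold Spec_move_rocks; infer_instance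

-- ===== CLAIM (what is proved, stated in full; the proofs are below) =====
def Claim_equal_move_rocks : Prop := ∀ (grid : List (List String)), Dom_move_rocks grid → Spec_move_rocks grid (move_rocks grid)

-- ===== LEMMAS AND PROOFS =====

-- reference split of a char list on '#', Python-style (always at least one segment)
def pvSp : List Char → List (List Char)
  | [] => [[]]
  | c :: cs => if c = '#' then [] :: pvSp cs else (pvSp cs).modifyHead (c :: ·)

-- tail part of '#'.join: each further segment preceded by '#'
def pvTj : List (List Char) → List Char
  | [] => []
  | s :: r => '#' :: s ++ pvTj r

-- A's per-segment rewrite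
def pvH (t : List Char) : List Char :=
  List.replicate (t.count 'O') 'O' ++ List.replicate (t.length - t.count 'O') '.'

-- B's per-row result as a recursion with pending counters
def pvG : List Char → Nat → Nat → List Char
  | [], o, d => List.replicate o 'O' ++ List.replicate d '.'
  | c :: cs, o, d =>
    if c = '#' then List.replicate o 'O' ++ List.replicate d '.' ++ '#' :: pvG cs 0 0
    else if c = 'O' then pvG cs (o + 1) d
    else pvG cs o (d + 1)

theorem pvSp_cons_exists (cs : List Char) : ∃ t r, pvSp cs = t :: r := by
  cases cs with
  | nil => exact ⟨[], [], rfl⟩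
  | cons c cs =>
    by_cases h : c = '#'
    · exact ⟨[], pvSp cs, by simp [pvSp, h]⟩
    · obtain ⟨t, r, ht⟩ := pvSp_cons_exists cs
      exact ⟨c :: t, r, by simp [pvSp, h, ht]⟩

theorem pvCountGo (l : List Char) : ∀ (fuel acc : Nat), l.length ≤ fuel →
    PySem.Chars.count.go ['O'] fuel l acc = acc + l.count 'O' := by
  induction l with
  | nil => intro fuel acc _; cases fuel <;> simp [PySem.Chars.count.go]
  | cons c t ih =>
    intro fuel acc hf
    cases fuel with
    | zero => simp at hf
    | succ f =>
      have hf' : t.length ≤ f := by simpa using hf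
      by_cases h : c = 'O'
      · subst h
        rw [show PySem.Chars.count.go ['O'] (f + 1) ('O' :: t) acc
              = PySem.Chars.count.go ['O'] f t (acc + 1) by
            simp [PySem.Chars.count.go, List.isPrefixOf]]
        rw [ih f (acc + 1) hf']
        simp [List.count_cons]
        omega
      · rw [show PySem.Chars.count.go ['O'] (f + 1) (c :: t) acc
              = PySem.Chars.count.go ['O'] f t acc by
            simp [PySem.Chars.count.go, List.isPrefixOf, h, Ne.symm h]]
        rw [ih f acc hf']
        simp [List.count_cons, h]

theorem pvCount (seg : List Char) : PySem.Chars.count seg ['O'] = seg.count 'O' := by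
  simp [PySem.Chars.count, pvCountGo seg seg.length 0 le_rfl]

def pvConsHead (pre : List Char) : List (List Char) → List (List Char)
  | [] => [pre]
  | s :: r => (pre ++ s) :: r

theorem pvSpGo (l : List Char) : ∀ (cur : List Char) (acc : List (List Char)) (fuel : Nat),
    l.length ≤ fuel →
    PySem.Chars.splitOn.go ['#'] fuel l cur acc
      = acc.reverse ++ pvConsHead cur.reverse (pvSp l) := by
  induction l with
  | nil =>
    intro cur acc fuel _
    cases fuel <;> simp [PySem.Chars.splitOn.go, pvSp, pvConsHead]
  | cons c rest ih =>
    intro cur acc fuel hf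
    cases fuel with
    | zero => simp at hf
    | succ f =>
      by_cases h : c = '#'
      · have : List.isPrefixOf ['#'] (c :: rest) = true := by simp [List.isPrefixOf, h]
        simp only [PySem.Chars.splitOn.go, this, if_pos]
        rw [show List.drop (['#'] : List Char).length (c :: rest) = rest by simp]
        rw [ih [] (cur.reverse :: acc) f (by simpa using hf)]
        obtain ⟨t, r, ht⟩ := pvSp_cons_exists rest
        simp [pvSp, h, ht, pvConsHead]
      · have : List.isPrefixOf ['#'] (c :: rest) = false := by simp [List.isPrefixOf, Ne.symm h]
        simp only [PySem.Chars.splitOn.go, this, Bool.false_eq_true, if_false]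
        rw [ih (c :: cur) acc f (by simpa using hf)]
        obtain ⟨t, r, ht⟩ := pvSp_cons_exists rest
        simp [pvSp, h, ht, pvConsHead]

theorem pvSplit (cs : List Char) : PySem.Chars.splitOn cs ['#'] = pvSp cs := by
  rw [PySem.Chars.splitOn, pvSpGo cs [] [] (cs.length + 1) (by omega)]
  obtain ⟨t, r, ht⟩ := pvSp_cons_exists cs
  simp [ht, pvConsHead]

theorem pvKey (cs : List Char) : ∀ (t : List Char) (r : List (List Char)), pvSp cs = t :: r →
    ∀ o d : Nat, pvG cs o d
      = List.replicate (o + t.count 'O') 'O'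
        ++ List.replicate (d + (t.length - t.count 'O')) '.'
        ++ pvTj (r.map pvH) := by
  induction cs with
  | nil =>
    intro t r h o d
    simp only [pvSp] at h
    injection h with h1 h2
    subst h1; subst h2
    simp [pvG, pvTj]
  | cons c cs ih =>
    intro t r h o d
    by_cases hc : c = '#'
    · rw [show pvSp (c :: cs) = [] :: pvSp cs by simp [pvSp, hc]] at h
      injection h with h1 h2
      subst h1; subst h2
      obtain ⟨t', r', ht'⟩ := pvSp_cons_exists cs
      rw [show pvG (c :: cs) o d = List.replicate o 'O' ++ List.replicate d '.' ++ '#' :: pvG cs 0 0 by simp [pvG, hc]]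
      rw [ih t' r' ht' 0 0, ht']
      simp [pvTj, pvH]
    · obtain ⟨t', r', ht'⟩ := pvSp_cons_exists cs
      rw [show pvSp (c :: cs) = (c :: t') :: r' by simp [pvSp, hc, ht']] at h
      injection h with h1 h2
      subst h1; subst h2
      by_cases ho : c = 'O'
      · rw [show pvG (c :: cs) o d = pvG cs (o + 1) d by simp [pvG, hc, ho]]
        rw [ih t' r' ht' (o + 1) d]
        have hle := List.count_le_length (a := 'O') (l := t')
        rw [show List.count 'O' (c :: t') = List.count 'O' t' + 1 by simp [List.count_cons, ho]]
        rw [List.length_cons]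
        rw [show o + (List.count 'O' t' + 1) = o + 1 + List.count 'O' t' by omega,
            show t'.length + 1 - (List.count 'O' t' + 1) = t'.length - List.count 'O' t' by omega]
      · rw [show pvG (c :: cs) o d = pvG cs o (d + 1) by simp [pvG, hc, ho]]
        rw [ih t' r' ht' o (d + 1)]
        have hle := List.count_le_length (a := 'O') (l := t')
        rw [show List.count 'O' (c :: t') = List.count 'O' t' by simp [List.count_cons, ho]]
        rw [List.length_cons]
        rw [show d + (t'.length + 1 - List.count 'O' t') = d + 1 + (t'.length - List.count 'O' t') by omega]

theorem pvJoinCons (L : List (List Char)) : ∀ (x : List Char),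
    PySem.Chars.join ['#'] (x :: L) = x ++ pvTj L := by
  induction L with
  | nil => intro x; simp [PySem.Chars.join_singleton, pvTj]
  | cons y L' ih =>
    intro x
    rw [PySem.Chars.join_cons_cons, ih y]
    simp [pvTj]

theorem pvJoinNil (L : List (List Char)) : PySem.Chars.join [] L = L.flatten := by
  induction L with
  | nil => simp [PySem.Chars.join_nil]
  | cons x L' ih =>
    cases L' with
    | nil => simp [PySem.Chars.join_singleton]
    | cons y r => rw [PySem.Chars.join_cons_cons]; simp at ih ⊢; rw [ih]

-- B's fold-with-flush equals pvG, at the 1-char-string level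
theorem pvBflush (cs : List Char) : ∀ (out : List String) (o d : Nat),
    (cs.foldl pvStep (out, o, d)).1
      ++ List.replicate (cs.foldl pvStep (out, o, d)).2.1 "O"
      ++ List.replicate (cs.foldl pvStep (out, o, d)).2.2 "."
    = out ++ (pvG cs o d).map (fun c => String.mk [c]) := by
  induction cs with
  | nil => intro out o d; simp [pvG, List.map_replicate]; rfl
  | cons c cs ih =>
    intro out o d
    by_cases hc : c = '#'
    · rw [show (c :: cs).foldl pvStep (out, o, d)
          = cs.foldl pvStep (out ++ List.replicate o "O" ++ List.replicate d "." ++ ["#"], 0, 0) by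
        simp [pvStep, hc]]
      rw [ih]
      simp [pvG, hc, List.map_replicate]
      rfl
    · by_cases ho : c = 'O'
      · rw [show (c :: cs).foldl pvStep (out, o, d) = cs.foldl pvStep (out, o + 1, d) by
          simp [pvStep, hc, ho]]
        rw [ih]
        simp [pvG, hc, ho]
      · rw [show (c :: cs).foldl pvStep (out, o, d) = cs.foldl pvStep (out, o, d + 1) by
          simp [pvStep, hc, ho]]
        rw [ih]
        simp [pvG, hc, ho]

-- per-row equality
theorem pvRow (row : List String) :
    (let string := PySem.Str.join "" row
     let segments := PySem.Chars.splitOn string.toList ['#']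
     let new_segments := segments.foldl (fun acc segment =>
       let o_count := PySem.Chars.count segment ['O']
       let ns := List.replicate o_count 'O' ++ List.replicate (segment.length - o_count) '.'
       acc ++ [ns]) []
     let new_string := PySem.Chars.join ['#'] new_segments
     new_string.map (fun c => String.mk [c]))
    = (let st := row.foldl (fun st cell => cell.toList.foldl pvStep st)
                 (([] : List String), (0 : Nat), (0 : Nat))
       st.1 ++ List.replicate st.2.1 "O" ++ List.replicate st.2.2 ".") := by
  simp only
  have hcs : (PySem.Str.join "" row).toList = (row.map String.toList).flatten := by
    rw [PySem.Str.toList_join, show "".toList = ([] : List Char) from rfl, pvJoinNil]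
  set cs : List Char := (row.map String.toList).flatten with hcsdef
  -- A side
  have hA : (PySem.Chars.splitOn (PySem.Str.join "" row).toList ['#']).foldl
      (fun acc segment =>
        acc ++ [List.replicate (PySem.Chars.count segment ['O']) 'O'
                ++ List.replicate (segment.length - PySem.Chars.count segment ['O']) '.']) []
      = (pvSp cs).map pvH := by
    rw [hcs, pvSplit]
    rw [show (fun (acc : List (List Char)) segment =>
        acc ++ [List.replicate (PySem.Chars.count segment ['O']) 'O'
                ++ List.replicate (segment.length - PySem.Chars.count segment ['O']) '.'])
      = fun acc segment => acc ++ [pvH segment] by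
        funext acc segment; rw [pvCount]; rfl]
    simpa using PySem.List.foldl_append_singleton_eq_map pvH (pvSp cs) []
  rw [hA]
  -- B side: fold over cells = fold over the flattened chars
  have hB : row.foldl (fun st cell => cell.toList.foldl pvStep st)
      (([] : List String), (0 : Nat), (0 : Nat))
      = cs.foldl pvStep (([] : List String), (0 : Nat), (0 : Nat)) := by
    rw [hcsdef, List.foldl_flatten, List.foldl_map]
  rw [hB]
  rw [pvBflush cs [] 0 0]
  obtain ⟨t, r, ht⟩ := pvSp_cons_exists cs
  rw [ht, List.map_cons, pvJoinCons, pvKey cs t r ht 0 0]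
  simp [pvH, pvTj]

-- ===== VERDICT (by name: the statement is the Claim_ definition above) =====
theorem move_rocks_spec : Claim_equal_move_rocks := by
  intro grid _
  unfold Spec_move_rocks move_rocks move_rocks_alt
  apply List.map_congr_left
  intro row _
  exact pvRow row
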